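-- pv_equiv track=rewrite | github.com/TonyAlarcon/racod | tony/dataset/utils.py | check_collision_obb
-- ===== SOURCE A (Python) =====
-- from typing import List, Tuple, Optional, Set
-- from typing import List, Tuple
--
-- def check_collision_obb(pos: Tuple[int, int], grid: List[List[int]], radius: int) -> bool:
--     x0, y0 = pos
--     height, width = len(grid), len(grid[0])
--     for dy in range(-radius, radius + 1):
--         for dx in range(-radius, radius + 1):
--             x, y = x0 + dx, y0 + dy
--             if x < 0 or x >= width or y < 0 or y >= height:
--                 return False
--             if grid[y][x] == '@':  # obstacle
--                 return False
--     return True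
-- ===== SOURCE B (Python) =====
-- def check_collision_obb(pos, grid, radius):
--     x0, y0 = pos
--     if radius < 0:
--         return True
--     height, width = len(grid), len(grid[0])
--     if x0 - radius < 0 or x0 + radius >= width or y0 - radius < 0 or y0 + radius >= height:
--         return False
--     for y, row in enumerate(grid):
--         if abs(y - y0) <= radius:
--             for x, cell in enumerate(row):
--                 if abs(x - x0) <= radius and cell == '@':
--                     return False
--     return True
-- ===== Notes on version B (the rewrite author's own statement) =====
-- stated objective: alternative
-- what changed: B inverts the traversal: instead of generating window coordinates and indexing the grid per cell like A, it does one closed-form window-containment check and then enumerates the grid's own rows and cells, filtering by distance from pos to detect an obstacle, so no grid indexing occurs at all.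
-- outside the precondition, e.g. on check_collision_obb((0, 0), [['a', 'b'], ['c']], 1): A returns False, B returns False
import Mathlib
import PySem

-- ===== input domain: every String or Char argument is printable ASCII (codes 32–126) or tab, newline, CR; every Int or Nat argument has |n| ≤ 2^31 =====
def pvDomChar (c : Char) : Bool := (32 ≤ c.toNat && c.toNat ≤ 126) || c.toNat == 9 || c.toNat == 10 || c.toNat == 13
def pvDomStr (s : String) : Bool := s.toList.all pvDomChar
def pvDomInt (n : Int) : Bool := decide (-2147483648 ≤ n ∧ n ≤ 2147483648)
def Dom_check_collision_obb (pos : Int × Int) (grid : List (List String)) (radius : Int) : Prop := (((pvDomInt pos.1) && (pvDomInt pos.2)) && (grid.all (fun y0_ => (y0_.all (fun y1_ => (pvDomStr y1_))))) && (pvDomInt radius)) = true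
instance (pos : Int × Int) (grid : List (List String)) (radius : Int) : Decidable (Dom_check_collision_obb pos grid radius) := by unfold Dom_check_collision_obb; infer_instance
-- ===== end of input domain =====

-- B inverts the traversal: one closed-form window-containment check, then it enumerates
-- the grid's own rows and cells (no per-cell indexing), filtering by distance from pos
-- (objective: alternative).

-- ===== PORT A =====
-- grid[y][x] as in Python (only evaluated after the in-bounds checks); defaults are
-- never reached inside Pre_check_collision_obb.
def pvCell (grid : List (List String)) (y x : Int) : String :=
  (PySem.List.pyGet? ((PySem.List.pyGet? grid y).getD []) x).getD ""

-- inner 'for dx' loop of A: fuel counts the remaining iterations; false = 'return False'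
def pvAInner (x0 y0 dy : Int) (grid : List (List String)) (width height : Int)
    (dx : Int) (fuel : Nat) : Bool :=
  match fuel with
  | 0 => true
  | f + 1 =>
    let x := x0 + dx
    let y := y0 + dy
    if x < 0 ∨ x ≥ width ∨ y < 0 ∨ y ≥ height then false
    else if pvCell grid y x = "@" then false
    else pvAInner x0 y0 dy grid width height (dx + 1) f

-- outer 'for dy' loop of A
def pvAOuter (x0 y0 radius : Int) (grid : List (List String)) (width height : Int)
    (dy : Int) (fuel : Nat) : Bool :=
  match fuel with
  | 0 => true
  | f + 1 =>
    if pvAInner x0 y0 dy grid width height (-radius) (2 * radius + 1).toNat then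
      pvAOuter x0 y0 radius grid width height (dy + 1) f
    else false

def check_collision_obb (pos : Int × Int) (grid : List (List String)) (radius : Int) : Bool :=
  let x0 := pos.1
  let y0 := pos.2
  let height : Int := grid.length
  let width : Int := (((PySem.List.pyGet? grid 0).getD []).length : Int)
  pvAOuter x0 y0 radius grid width height (-radius) (2 * radius + 1).toNat

-- ===== PORT B =====
def check_collision_obb_alt (pos : Int × Int) (grid : List (List String)) (radius : Int) : Bool :=
  let x0 := pos.1
  let y0 := pos.2
  if radius < 0 then true
  else
    let height : Int := grid.length
    let width : Int := (((PySem.List.pyGet? grid 0).getD []).length : Int)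
    if x0 - radius < 0 ∨ x0 + radius ≥ width ∨ y0 - radius < 0 ∨ y0 + radius ≥ height then false
    else
      (PySem.List.enumerate grid).all fun yr =>
        if |yr.1 - y0| ≤ radius then
          (PySem.List.enumerate yr.2).all fun xc =>
            !(decide (|xc.1 - x0| ≤ radius) && decide (xc.2 = "@"))
        else true

-- ===== PRECONDITION & SPEC =====
-- Pre_ excludes the empty grid (grid[0] raises IndexError in A) and grids with a row
-- inside the scanned vertical window shorter than row 0, on which A's grid[y][x] may
-- raise IndexError (on some such grids A still returns before reaching the short spot).
def Pre_check_collision_obb (pos : Int × Int) (grid : List (List String)) (radius : Int) : Prop :=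
  grid ≠ [] ∧ ∀ i : Nat, i < grid.length →
    (pos.2 - radius ≤ (i : Int) ∧ (i : Int) ≤ pos.2 + radius) →
    (grid.headD []).length ≤ (grid.getD i []).length
instance (pos : Int × Int) (grid : List (List String)) (radius : Int) : Decidable (Pre_check_collision_obb pos grid radius) := by unfold Pre_check_collision_obb; infer_instance

def pvWitness_check_collision_obb : (Int × Int) × List (List String) × Int :=
  ((1, 1), [["a", "b", "c"], [".", ".", "@"], [".", ".", "."]], 1)

def Spec_check_collision_obb (pos : Int × Int) (grid : List (List String)) (radius : Int) (out : Bool) : Prop := out = check_collision_obb_alt pos grid radius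
instance (pos : Int × Int) (grid : List (List String)) (radius : Int) (out : Bool) : Decidable (Spec_check_collision_obb pos grid radius out) := by unfold Spec_check_collision_obb; infer_instance

-- ===== CLAIM (what is proved, stated in full; the proofs are below) =====
def Claim_equal_check_collision_obb : Prop := ∀ (pos : Int × Int) (grid : List (List String)) (radius : Int), Dom_check_collision_obb pos grid radius → Pre_check_collision_obb pos grid radius → Spec_check_collision_obb pos grid radius (check_collision_obb pos grid radius)

-- ===== LEMMAS AND PROOFS =====

-- the per-cell condition: cell (x, y) is in bounds and not an obstacle
def pvOK (grid : List (List String)) (width height y x : Int) : Prop :=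
  0 ≤ x ∧ x < width ∧ 0 ≤ y ∧ y < height ∧ pvCell grid y x ≠ "@"

theorem pvAInner_true_iff (x0 y0 dy : Int) (grid : List (List String)) (width height : Int)
    (fuel : Nat) (dx : Int) :
    pvAInner x0 y0 dy grid width height dx fuel = true ↔
      ∀ k : Nat, k < fuel → pvOK grid width height (y0 + dy) (x0 + dx + k) := by
  induction fuel generalizing dx with
  | zero => simp [pvAInner]
  | succ f ih =>
    rw [pvAInner]
    by_cases hb : (x0 + dx < 0 ∨ x0 + dx ≥ width ∨ y0 + dy < 0 ∨ y0 + dy ≥ height)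
    · simp only [hb, if_true]
      constructor
      · intro h; cases h
      · intro h
        have := h 0 (Nat.succ_pos f)
        rcases this with ⟨h1, h2, h3, h4, _⟩
        simp at h1 h2 h3 h4
        omega
    · simp only [hb, if_false]
      by_cases hc : pvCell grid (y0 + dy) (x0 + dx) = "@"
      · simp only [hc, if_true]
        constructor
        · intro h; cases h
        · intro h
          have := h 0 (Nat.succ_pos f)
          rcases this with ⟨_, _, _, _, h5⟩
          simp at h5
          exact absurd hc h5
      · simp only [hc, if_false]
        rw [ih]
        constructor
        · intro h k hk
          cases k with
          | zero =>
            refine ⟨?_, ?_, ?_, ?_, ?_⟩ <;> try omega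
            · simpa using hc
          | succ k' =>
            have := h k' (by omega)
            have e : x0 + (dx + 1) + k' = x0 + dx + (k' + 1 : Nat) := by push_cast; ring
            rwa [e] at this
        · intro h k hk
          have := h (k + 1) (by omega)
          have e : x0 + dx + ((k : Int) + 1) = x0 + (dx + 1) + k := by ring
          push_cast at this ⊢
          rwa [e] at this

theorem pvAOuter_true_iff (x0 y0 radius : Int) (grid : List (List String)) (width height : Int)
    (fuel : Nat) (dy : Int) :
    pvAOuter x0 y0 radius grid width height dy fuel = true ↔
      ∀ j : Nat, j < fuel → ∀ k : Nat, k < (2 * radius + 1).toNat →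
        pvOK grid width height (y0 + (dy + j)) (x0 + (-radius) + k) := by
  induction fuel generalizing dy with
  | zero => simp [pvAOuter]
  | succ f ih =>
    rw [pvAOuter]
    by_cases hin : pvAInner x0 y0 dy grid width height (-radius) (2 * radius + 1).toNat = true
    · simp only [hin, if_true]
      rw [ih]
      rw [pvAInner_true_iff] at hin
      constructor
      · intro h j hj k hk
        cases j with
        | zero => simpa using hin k hk
        | succ j' =>
          have := h j' (by omega) k hk
          have e : y0 + (dy + 1 + (j' : Int)) = y0 + (dy + ((j' + 1 : Nat) : Int)) := by push_cast; ring
          rwa [e] at this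
      · intro h j hj k hk
        have := h (j + 1) (by omega) k hk
        have e : y0 + (dy + ((j + 1 : Nat) : Int)) = y0 + (dy + 1 + (j : Int)) := by push_cast; ring
        rwa [e] at this
    · simp only [hin]
      constructor
      · intro h; cases h
      · intro h
        exfalso
        apply hin
        rw [pvAInner_true_iff]
        intro k hk
        simpa using h 0 (Nat.succ_pos f) k hk

-- pvCell on valid nat indices is plain list indexing
theorem pvCell_nat (grid : List (List String)) (i j : Nat)
    (hi : i < grid.length) (hj : j < (grid[i]'hi).length) :
    pvCell grid (i : Int) (j : Int) = (grid[i]'hi)[j]'hj := by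
  rw [pvCell]
  simp only [PySem.List.pyGet?_natCast]
  rw [List.getElem?_eq_getElem hi]
  simp only [Option.getD_some]
  rw [List.getElem?_eq_getElem hj]
  simp

-- characterisation of B's grid scan (under the row-length hypothesis and window bounds)
theorem pvBscan_true_iff (x0 y0 radius : Int) (grid : List (List String)) (width : Int)
    (hrow : ∀ i : Nat, (h : i < grid.length) → (y0 - radius ≤ (i : Int) ∧ (i : Int) ≤ y0 + radius) →
      width ≤ ((grid[i]'h).length : Int))
    (hb1 : 0 ≤ x0 - radius) (hb2 : x0 + radius < width)
    (hb3 : 0 ≤ y0 - radius) (hb4 : y0 + radius < (grid.length : Int)) :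
    ((PySem.List.enumerate grid).all fun yr =>
        if |yr.1 - y0| ≤ radius then
          (PySem.List.enumerate yr.2).all fun xc =>
            !(decide (|xc.1 - x0| ≤ radius) && decide (xc.2 = "@"))
        else true) = true ↔
      ∀ y x : Int, y0 - radius ≤ y → y ≤ y0 + radius → x0 - radius ≤ x → x ≤ x0 + radius →
        pvCell grid y x ≠ "@" := by
  rw [List.all_eq_true]
  constructor
  · intro h y x hy1 hy2 hx1 hx2
    have hyn : y.toNat < grid.length := by omega
    have hy0' : 0 ≤ y := by omega
    have hmem : ((y : Int), grid[y.toNat]'hyn) ∈ PySem.List.enumerate grid := by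
      rw [PySem.List.mem_enumerate_iff]
      exact ⟨y.toNat, hyn, by simp; omega⟩
    have h1 := h _ hmem
    simp only at h1
    have hcond : |y - y0| ≤ radius := by
      rw [abs_le]; omega
    rw [if_pos hcond, List.all_eq_true] at h1
    have hwr := hrow y.toNat hyn (by omega)
    have hxn : x.toNat < (grid[y.toNat]'hyn).length := by omega
    have hx0' : 0 ≤ x := by omega
    have hmem2 : ((x : Int), (grid[y.toNat]'hyn)[x.toNat]'hxn) ∈ PySem.List.enumerate (grid[y.toNat]'hyn) := by
      rw [PySem.List.mem_enumerate_iff]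
      exact ⟨x.toNat, hxn, by simp; omega⟩
    have h2 := h1 _ hmem2
    simp only [Bool.not_eq_eq_eq_not, Bool.not_true, Bool.and_eq_false_iff,
      decide_eq_false_iff_not] at h2
    have ey : y = ((y.toNat : Nat) : Int) := by omega
    have ex : x = ((x.toNat : Nat) : Int) := by omega
    rw [ey, ex, pvCell_nat grid y.toNat x.toNat hyn hxn]
    rcases h2 with h2 | h2
    · exfalso; apply h2; rw [abs_le]; omega
    · exact h2
  · intro h p hp
    rw [PySem.List.mem_enumerate_iff] at hp
    obtain ⟨k, hk, rfl⟩ := hp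
    simp only
    by_cases hcy : |(0 : Int) + (k : Int) - y0| ≤ radius
    · rw [if_pos hcy, List.all_eq_true]
      intro q hq
      rw [PySem.List.mem_enumerate_iff] at hq
      obtain ⟨j, hj, rfl⟩ := hq
      simp only [Bool.not_eq_eq_eq_not, Bool.not_true, Bool.and_eq_false_iff,
        decide_eq_false_iff_not]
      by_cases hcx : |(0 : Int) + (j : Int) - x0| ≤ radius
      · right
        rw [abs_le] at hcy hcx
        have := h (k : Int) (j : Int) (by omega) (by omega) (by omega) (by omega)
        rw [pvCell_nat grid k j hk hj] at this
        exact this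
      · left; simpa using hcx
    · rw [if_neg hcy]

-- ===== VERDICT (by name: the statement is the Claim_ definition above) =====
theorem check_collision_obb_spec : Claim_equal_check_collision_obb := by
  unfold Claim_equal_check_collision_obb
  intro pos grid radius _ hpre
  unfold Spec_check_collision_obb
  unfold check_collision_obb check_collision_obb_alt
  set x0 := pos.1 with hx0
  set y0 := pos.2 with hy0
  set width : Int := (((PySem.List.pyGet? grid 0).getD []).length : Int) with hw
  set height : Int := (grid.length : Int) with hh
  by_cases hr : radius < 0
  · have h0 : (2 * radius + 1).toNat = 0 := by omega
    simp only [hr, if_true, h0]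
    rfl
  · simp only [hr, if_false]
    push Not at hr
    have hn : ((2 * radius + 1).toNat : Int) = 2 * radius + 1 := by omega
    rw [Bool.eq_iff_iff, pvAOuter_true_iff]
    by_cases hbad : (x0 - radius < 0 ∨ x0 + radius ≥ width ∨ y0 - radius < 0 ∨ y0 + radius ≥ height)
    · simp only [hbad, if_true]
      constructor
      · intro h
        exfalso
        rcases hbad with h1 | h2 | h3 | h4
        · have := h 0 (by omega) 0 (by omega)
          rcases this with ⟨c1, _⟩; simp at c1; omega
        · have := h 0 (by omega) (2 * radius).toNat (by omega)
          rcases this with ⟨_, c2, _⟩; omega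
        · have := h 0 (by omega) 0 (by omega)
          rcases this with ⟨_, _, c3, _⟩; simp at c3; omega
        · have := h (2 * radius).toNat (by omega) 0 (by omega)
          rcases this with ⟨_, _, _, c4, _⟩; omega
      · intro h; cases h
    · simp only [hbad, if_false]
      push Not at hbad
      obtain ⟨b1, b2, b3, b4⟩ := hbad
      have hrow : ∀ i : Nat, (h : i < grid.length) →
          (y0 - radius ≤ (i : Int) ∧ (i : Int) ≤ y0 + radius) →
          width ≤ ((grid[i]'h).length : Int) := by
        intro i hi hwin
        obtain ⟨hne, hlen⟩ := hpre
        have := hlen i hi (by rw [← hy0]; exact hwin)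
        have hhead : grid.headD [] = (PySem.List.pyGet? grid 0).getD [] := by
          cases grid with
          | nil => simp at hne
          | cons a l => simp [PySem.List.pyGet?, PySem.List.pyIdx?]
        have hgetd : grid.getD i [] = grid[i]'hi := by
          simp [List.getD, hi]
        rw [hhead, hgetd] at this
        rw [hw]
        exact_mod_cast this
      have B1 : 0 ≤ x0 - radius := by omega
      have B2 : x0 + radius < width := by omega
      have B3 : 0 ≤ y0 - radius := by omega
      have B4 : y0 + radius < (grid.length : Int) := by rw [← hh]; omega
      rw [pvBscan_true_iff x0 y0 radius grid width hrow B1 B2 B3 B4]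
      constructor
      · intro h y x hy1 hy2 hx1 hx2
        have hj : ((y - (y0 - radius)).toNat : Int) = y - (y0 - radius) := by omega
        have hk : ((x - (x0 - radius)).toNat : Int) = x - (x0 - radius) := by omega
        have := h (y - (y0 - radius)).toNat (by omega) (x - (x0 - radius)).toNat (by omega)
        rcases this with ⟨_, _, _, _, h5⟩
        have ey : y0 + (-radius + ((y - (y0 - radius)).toNat : Int)) = y := by omega
        have ex : x0 + -radius + ((x - (x0 - radius)).toNat : Int) = x := by omega
        rw [ey, ex] at h5
        exact h5
      · intro h j hj k hk
        refine ⟨by omega, by omega, by omega, by omega, ?_⟩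
        exact h (y0 + (-radius + (j : Int))) (x0 + -radius + (k : Int))
          (by omega) (by omega) (by omega) (by omega)
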